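-- pv_equiv track=rewrite | github.com/WalterA/allrepo | ITSCloud-main/ProjectsVScode/Prima_luglio/Esercizi_obbligatori/Lezione28/moltiplica.py | moltiplica_numeri
-- ===== SOURCE A (Python) =====
-- def moltiplica_numeri(numbers: list[int], threshold: int) -> int:
--     temp=0
--     for i in numbers:
--         if i < threshold:
--             if temp:
--                 if i < threshold:
--                     temp*=i
--             else:
--                 temp=i
--     if temp:
--         return temp
--     else:
--         return 1
-- ===== SOURCE B (Python) =====
-- def moltiplica_numeri(numbers: list[int], threshold: int) -> int:
--     if not numbers:
--         return 1
--     head, *rest = numbers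
--     rec = moltiplica_numeri(rest, threshold)
--     return head * rec if head < threshold else rec
-- ===== Notes on version B (the rewrite author's own statement) =====
-- stated objective: simpler
-- what changed: Replaces A's forward sentinel-reset accumulator (temp=0 doubling as 'empty' marker plus a final truthiness fixup) with a direct recursive product of the elements below the threshold.
-- intended difference: When the list contains a 0 and the threshold is positive, the qualifying 0 silently resets A's accumulator so A returns the (nonzero) product of the qualifying elements after the last qualifying zero, while B returns 0, the actual product of the elements below the threshold, which is what the function's purpose demands. — e.g. on moltiplica_numeri([0], 1): A returns 1, B returns 0
import Mathlib
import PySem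

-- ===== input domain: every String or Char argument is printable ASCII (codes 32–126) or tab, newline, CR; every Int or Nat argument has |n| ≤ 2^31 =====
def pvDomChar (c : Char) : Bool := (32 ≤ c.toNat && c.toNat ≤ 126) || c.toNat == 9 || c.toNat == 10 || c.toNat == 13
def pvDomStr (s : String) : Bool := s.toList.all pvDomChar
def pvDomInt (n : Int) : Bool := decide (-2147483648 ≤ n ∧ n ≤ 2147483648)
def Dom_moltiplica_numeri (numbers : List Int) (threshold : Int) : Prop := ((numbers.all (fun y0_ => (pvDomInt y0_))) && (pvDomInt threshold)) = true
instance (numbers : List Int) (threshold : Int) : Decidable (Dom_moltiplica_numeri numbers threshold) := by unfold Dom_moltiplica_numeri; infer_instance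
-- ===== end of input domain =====

-- B computes the product of the elements below the threshold directly (recursively), dropping A's sentinel accumulator; where a qualifying 0 occurs A's accumulator is accidentally reset, stated as an intended difference D_.


-- ===== PORT A =====
def moltiplica_numeri (numbers : List Int) (threshold : Int) : Int :=
  let temp := numbers.foldl
    (fun temp i => if i < threshold then (if temp ≠ 0 then temp * i else i) else temp) 0
  if temp ≠ 0 then temp else 1

-- ===== PORT B =====
def moltiplica_numeri_alt (numbers : List Int) (threshold : Int) : Int :=
  match numbers with
  | [] => 1
  | head :: rest =>
      let p := moltiplica_numeri_alt rest threshold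
      if head < threshold then head * p else p

-- ===== PRECONDITION & SPEC =====
-- When the list contains a 0 and the threshold is positive, the qualifying 0 silently resets A's
-- accumulator so A returns the (nonzero) product of the qualifying elements after the last
-- qualifying zero, while B returns 0, the actual product of the elements below the threshold,
-- which is what the function's purpose demands.
def D_moltiplica_numeri (numbers : List Int) (threshold : Int) : Prop :=
  (0 : Int) ∈ numbers ∧ 0 < threshold
instance (numbers : List Int) (threshold : Int) : Decidable (D_moltiplica_numeri numbers threshold) := by
  unfold D_moltiplica_numeri; infer_instance

def Spec_moltiplica_numeri (numbers : List Int) (threshold : Int) (out : Int) : Prop :=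
  ¬ D_moltiplica_numeri numbers threshold → out = moltiplica_numeri_alt numbers threshold
instance (numbers : List Int) (threshold : Int) (out : Int) : Decidable (Spec_moltiplica_numeri numbers threshold out) := by
  unfold Spec_moltiplica_numeri; infer_instance

def pvDiffWitness_moltiplica_numeri : List Int × Int := ([0], 1)
def pvDiffWitnessOut_moltiplica_numeri : Int × Int := (1, 0)

-- ===== CLAIM =====
def Claim_unchanged_moltiplica_numeri : Prop := ∀ (numbers : List Int) (threshold : Int), Dom_moltiplica_numeri numbers threshold → Spec_moltiplica_numeri numbers threshold (moltiplica_numeri numbers threshold)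
def Claim_changed_moltiplica_numeri : Prop := Dom_moltiplica_numeri (pvDiffWitness_moltiplica_numeri.1) (pvDiffWitness_moltiplica_numeri.2) ∧ D_moltiplica_numeri (pvDiffWitness_moltiplica_numeri.1) (pvDiffWitness_moltiplica_numeri.2) ∧ moltiplica_numeri (pvDiffWitness_moltiplica_numeri.1) (pvDiffWitness_moltiplica_numeri.2) = pvDiffWitnessOut_moltiplica_numeri.1 ∧ moltiplica_numeri_alt (pvDiffWitness_moltiplica_numeri.1) (pvDiffWitness_moltiplica_numeri.2) = pvDiffWitnessOut_moltiplica_numeri.2 ∧ pvDiffWitnessOut_moltiplica_numeri.1 ≠ pvDiffWitnessOut_moltiplica_numeri.2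
def Claim_exact_moltiplica_numeri : Prop := ∀ (numbers : List Int) (threshold : Int), Dom_moltiplica_numeri numbers threshold → D_moltiplica_numeri numbers threshold → moltiplica_numeri numbers threshold ≠ moltiplica_numeri_alt numbers threshold

-- ===== LEMMAS AND PROOFS =====

-- Under "no qualifying element is zero", B's product is nonzero.
theorem alt_ne_zero (threshold : Int) (l : List Int)
    (H : ∀ i ∈ l, i < threshold → i ≠ 0) :
    moltiplica_numeri_alt l threshold ≠ 0 := by
  induction l with
  | nil => simp [moltiplica_numeri_alt]
  | cons x rest ih =>
      have hrest := ih (fun i hi => H i (List.mem_cons_of_mem _ hi))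
      by_cases hx : x < threshold
      · have hx0 : x ≠ 0 := H x List.mem_cons_self hx
        simp only [moltiplica_numeri_alt, if_pos hx]
        exact mul_ne_zero hx0 hrest
      · simpa [moltiplica_numeri_alt, hx] using hrest

-- A's loop with a nonzero accumulator multiplies by B's product.
theorem foldA_nonzero (threshold : Int) (l : List Int)
    (H : ∀ i ∈ l, i < threshold → i ≠ 0) :
    ∀ t : Int, t ≠ 0 →
      l.foldl (fun temp i => if i < threshold then (if temp ≠ 0 then temp * i else i) else temp) t
        = t * moltiplica_numeri_alt l threshold := by
  induction l with
  | nil => intro t _; simp [moltiplica_numeri_alt]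
  | cons x rest ih =>
      intro t ht
      have Hr : ∀ i ∈ rest, i < threshold → i ≠ 0 := fun i hi => H i (List.mem_cons_of_mem _ hi)
      by_cases hx : x < threshold
      · have hx0 : x ≠ 0 := H x List.mem_cons_self hx
        simp only [List.foldl_cons, if_pos hx, if_pos ht, moltiplica_numeri_alt]
        rw [ih Hr (t * x) (mul_ne_zero ht hx0)]
        ring
      · simp only [List.foldl_cons, if_neg hx, moltiplica_numeri_alt]
        rw [ih Hr t ht]

-- A with the initial sentinel 0 plus the final fixup equals B, when no qualifying element is 0.
theorem main_lemma (threshold : Int) (l : List Int)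
    (H : ∀ i ∈ l, i < threshold → i ≠ 0) :
    moltiplica_numeri l threshold = moltiplica_numeri_alt l threshold := by
  induction l with
  | nil => simp [moltiplica_numeri, moltiplica_numeri_alt]
  | cons x rest ih =>
      have Hr : ∀ i ∈ rest, i < threshold → i ≠ 0 := fun i hi => H i (List.mem_cons_of_mem _ hi)
      by_cases hx : x < threshold
      · have hx0 : x ≠ 0 := H x List.mem_cons_self hx
        have hrest := alt_ne_zero threshold rest Hr
        have hres : x * moltiplica_numeri_alt rest threshold ≠ 0 := mul_ne_zero hx0 hrest
        have h1 : List.foldl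
            (fun temp i => if i < threshold then (if temp ≠ 0 then temp * i else i) else temp)
            0 (x :: rest) = List.foldl
            (fun temp i => if i < threshold then (if temp ≠ 0 then temp * i else i) else temp)
            x rest := by
          rw [List.foldl_cons]; congr 1; rw [if_pos hx, if_neg (by norm_num)]
        unfold moltiplica_numeri
        rw [h1, foldA_nonzero threshold rest Hr x hx0, if_pos hres]
        simp [moltiplica_numeri_alt, hx]
      · have := ih Hr
        simp only [moltiplica_numeri, List.foldl_cons, if_neg hx] at this ⊢
        rw [this]
        simp [moltiplica_numeri_alt, hx]

-- A never returns 0 (final truthiness fixup).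
theorem a_ne_zero (l : List Int) (threshold : Int) : moltiplica_numeri l threshold ≠ 0 := by
  simp only [moltiplica_numeri]
  split_ifs with h
  · exact h
  · decide

-- Inside D_, B's product contains the factor 0.
theorem alt_eq_zero (threshold : Int) (l : List Int)
    (h0 : (0 : Int) ∈ l) (ht : 0 < threshold) :
    moltiplica_numeri_alt l threshold = 0 := by
  induction l with
  | nil => cases h0
  | cons x rest ih =>
      rcases List.mem_cons.mp h0 with hx | hx
      · subst hx; simp [moltiplica_numeri_alt, ht]
      · by_cases hlt : x < threshold <;> simp [moltiplica_numeri_alt, hlt, ih hx]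

-- ===== VERDICT =====
theorem moltiplica_numeri_spec : Claim_unchanged_moltiplica_numeri := by
  intro numbers threshold _ hD
  have H : ∀ i ∈ numbers, i < threshold → i ≠ 0 := by
    intro i hi hlt hz
    subst hz
    exact hD ⟨hi, hlt⟩
  exact (main_lemma threshold numbers H).symm ▸ rfl

theorem moltiplica_numeri_changed : Claim_changed_moltiplica_numeri := by
  unfold Claim_changed_moltiplica_numeri; decide

theorem moltiplica_numeri_tight : Claim_exact_moltiplica_numeri := by
  intro numbers threshold _ hD h
  exact a_ne_zero numbers threshold (h.trans (alt_eq_zero threshold numbers hD.1 hD.2))
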